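-- pv_equiv track=rewrite | github.com/Omega-Makena/KScarcity | kshiked/ui/kshield/causal/view.py | _has_directed_path
-- ===== SOURCE A (Python) =====
-- from typing import Any, Dict, List, Tuple, Optional
--
-- def _has_directed_path(
--     adjacency: Dict[str, set], start: str, target: str
-- ) -> bool:
--     """Return True if a directed path exists from start to target."""
--     if start == target:
--         return True
--     if start not in adjacency:
--         return False
--     seen = {start}
--     stack = [start]
--     while stack:
--         node = stack.pop()
--         for nxt in adjacency.get(node, set()):
--             if nxt == target:
--                 return True
--             if nxt not in seen:
--                 seen.add(nxt)
--                 stack.append(nxt)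
--     return False
-- ===== SOURCE B (Python) =====
-- def _has_directed_path(adjacency, start, target):
--     """Return True if a directed path exists from start to target."""
--     if start == target:
--         return True
--     if start not in adjacency:
--         return False
--     # Fixpoint computation: grow the reachable set until it stops changing,
--     # then test membership of the target once at the end.
--     reach = [start]
--     changed = True
--     while changed:
--         changed = False
--         for node in list(reach):
--             for nxt in adjacency.get(node, set()):
--                 if nxt not in reach:
--                     reach.append(nxt)
--                     changed = True
--     return target in reach
-- ===== Notes on version B (the rewrite author's own statement) =====
-- stated objective: alternative
-- what changed: Replaces A's early-exit DFS over an explicit stack+seen set by a round-based fixpoint computation: the reachable set is grown until it stops changing and the target is tested by a single membership check at the end.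
import Mathlib
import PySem

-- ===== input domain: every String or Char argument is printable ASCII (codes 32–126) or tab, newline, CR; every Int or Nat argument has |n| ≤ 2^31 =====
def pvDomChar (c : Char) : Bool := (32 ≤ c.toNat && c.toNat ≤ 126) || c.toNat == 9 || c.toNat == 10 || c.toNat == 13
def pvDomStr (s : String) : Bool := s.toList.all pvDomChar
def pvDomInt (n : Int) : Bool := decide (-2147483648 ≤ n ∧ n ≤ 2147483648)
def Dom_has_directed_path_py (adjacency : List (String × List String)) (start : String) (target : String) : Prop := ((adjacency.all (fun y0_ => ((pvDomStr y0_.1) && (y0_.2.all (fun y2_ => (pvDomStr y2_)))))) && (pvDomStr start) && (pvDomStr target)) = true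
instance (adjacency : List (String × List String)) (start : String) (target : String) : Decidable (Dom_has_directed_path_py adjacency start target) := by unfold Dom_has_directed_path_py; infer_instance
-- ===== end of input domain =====

-- B replaces A's early-exit DFS (stack + seen) by a round-based fixpoint: grow the
-- reachable set until it stabilises, then one membership test; same result, no speedup claimed.

-- ===== PORT A =====
-- shared helper: `adjacency.get(node, set())`
def pvNbrs (d : PySem.Dict String (List String)) (node : String) : List String :=
  d.getD node []

-- the finite universe every neighbour / key lives in (for termination measures only)
def pvU (d : PySem.Dict String (List String)) : List String :=
  d.keys ++ d.values.flatten

-- number of universe elements not yet collected (termination measure component)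
def pvCnt (d : PySem.Dict String (List String)) (seen : List String) : Nat :=
  (pvU d).countP (fun u => !(seen.contains u))

-- potential of A's stack (termination measure component)
def pvPot (d : PySem.Dict String (List String)) (stack : List String) : Nat :=
  (stack.map (fun x => 1 + 2 * (pvNbrs d x).length)).sum

lemma pvNbrs_mem_U {d : PySem.Dict String (List String)} {node x : String}
    (hx : x ∈ pvNbrs d node) : x ∈ pvU d := by
  unfold pvNbrs at hx
  unfold pvU
  rw [PySem.Dict.getD_eq_get?_getD] at hx
  cases hg : d.get? node with
  | none => rw [hg] at hx; simp at hx
  | some v =>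
    rw [hg] at hx
    simp only [Option.getD_some] at hx
    have hv : v ∈ d.values := by
      have := PySem.Dict.mem_items_of_get?_eq_some (d := d) hg
      simp only [PySem.Dict.values]
      exact List.mem_map.2 ⟨_, this, rfl⟩
    exact List.mem_append.2 (Or.inr (List.mem_flatten.2 ⟨v, hv, hx⟩))

lemma pvNbrs_of_not_mem_U {d : PySem.Dict String (List String)} {node : String}
    (h : node ∉ pvU d) : pvNbrs d node = [] := by
  unfold pvU at h
  have hk : node ∉ d.keys := fun hm => h (List.mem_append.2 (Or.inl hm))
  unfold pvNbrs
  apply PySem.Dict.getD_of_not_contains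
  rw [PySem.Dict.contains_eq_decide_mem_keys]
  simpa using hk

-- strict decrease of the count when a universe element is newly collected
lemma pvCountP_lt (U S T : List String) (hsub : ∀ y, y ∈ S → y ∈ T) (x : String)
    (hxU : x ∈ U) (hxT : x ∈ T) (hxS : x ∉ S) :
    U.countP (fun u => !(T.contains u)) < U.countP (fun u => !(S.contains u)) := by
  induction U with
  | nil => simp at hxU
  | cons a U ih =>
    simp only [List.countP_cons]
    rcases List.mem_cons.1 hxU with rfl | hmem
    · have h1 : (!(T.contains x)) = false := by simp [hxT]
      have h2 : (!(S.contains x)) = true := by simp [hxS]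
      rw [h1, h2]
      have hle : U.countP (fun u => !(T.contains u)) ≤ U.countP (fun u => !(S.contains u)) := by
        apply List.countP_mono_left
        intro y _ hy
        simp only [Bool.not_eq_true', List.contains_eq_mem, decide_eq_false_iff_not] at hy ⊢
        exact fun hyS => hy (hsub y hyS)
      simp only [Bool.false_eq_true, if_false, if_true]
      omega
    · have hlt := ih hmem
      have hmono : (if (!(T.contains a)) = true then 1 else 0) ≤ (if (!(S.contains a)) = true then 1 else 0) := by
        by_cases haT : a ∈ T
        · simp [haT]
        · have haS : a ∉ S := fun h => haT (hsub a h)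
          simp [haT, haS]
      omega

lemma pvCnt_cons_not_mem (d : PySem.Dict String (List String)) (S : List String) (x : String)
    (hx : x ∉ pvU d) : pvCnt d (x :: S) = pvCnt d S := by
  unfold pvCnt
  apply List.countP_congr
  intro y hy
  have hne : y ≠ x := fun h => hx (h ▸ hy)
  simp [List.contains_eq_mem, hne]

-- A's while/for loop as one recursion: `pending` is the remainder of the inner for-loop
-- over the popped node's neighbours (the stack top is the list head; order of exploration
-- only affects traversal order, not the Boolean result).
def aRun (d : PySem.Dict String (List String)) (target : String)
    (seen stack pending : List String) : Bool :=
  match pending with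
  | n :: ps =>
    if n = target then true
    else if seen.contains n then aRun d target seen stack ps
    else aRun d target (n :: seen) (n :: stack) ps
  | [] =>
    match stack with
    | [] => false
    | node :: rest => aRun d target seen rest (pvNbrs d node)
termination_by (pvCnt d seen, pvPot d stack + 2 * pending.length)
decreasing_by
  · apply Prod.Lex.right
    simp only [List.length_cons]
    omega
  · by_cases hU : n ∈ pvU d
    · apply Prod.Lex.left
      exact pvCountP_lt (pvU d) seen (n :: seen) (fun y hy => List.mem_cons_of_mem _ hy) n hU
        (List.mem_cons_self) (by simpa [List.contains_eq_mem] using ‹¬ seen.contains n = true›)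
    · rw [pvCnt_cons_not_mem d seen n hU]
      apply Prod.Lex.right
      simp only [pvPot, List.map_cons, List.sum_cons, pvNbrs_of_not_mem_U hU,
        List.length_nil, List.length_cons]
      omega
  · apply Prod.Lex.right
    simp only [pvPot, List.map_cons, List.sum_cons, List.length_nil]
    omega

def has_directed_path_py (adjacency : List (String × List String)) (start : String) (target : String) : Bool :=
  if start = target then true
  else if !((PySem.Dict.ofList adjacency).contains start) then false
  else aRun (PySem.Dict.ofList adjacency) target [start] [start] []

-- ===== PORT B =====
-- inner `for nxt in adjacency.get(node, set())` of one sweep (append unseen, set flag)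
def bInner (acc : List String × Bool) (ns : List String) : List String × Bool :=
  match ns with
  | [] => acc
  | n :: ns => if acc.1.contains n then bInner acc ns else bInner (acc.1 ++ [n], true) ns

-- outer `for node in list(reach)` of one sweep
def bSweep (d : PySem.Dict String (List String)) (acc : List String × Bool) (l : List String) : List String × Bool :=
  match l with
  | [] => acc
  | node :: l => bSweep d (bInner acc (pvNbrs d node)) l

lemma bInner_mono (acc : List String × Bool) (ns : List String) :
    ∀ y ∈ acc.1, y ∈ (bInner acc ns).1 := by
  induction ns generalizing acc with
  | nil => intro y hy; simpa [bInner] using hy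
  | cons n ns ih =>
    intro y hy
    rw [bInner]
    by_cases h : acc.1.contains n
    · rw [if_pos h]; exact ih acc y hy
    · rw [if_neg h]; exact ih (acc.1 ++ [n], true) y (List.mem_append.2 (Or.inl hy))

lemma bInner_subset (acc : List String × Bool) (ns : List String) :
    ∀ y ∈ (bInner acc ns).1, y ∈ acc.1 ∨ y ∈ ns := by
  induction ns generalizing acc with
  | nil => intro y hy; exact Or.inl (by simpa [bInner] using hy)
  | cons n ns ih =>
    intro y hy
    rw [bInner] at hy
    by_cases h : acc.1.contains n
    · rw [if_pos h] at hy
      rcases ih acc y hy with h1 | h2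
      · exact Or.inl h1
      · exact Or.inr (List.mem_cons_of_mem _ h2)
    · rw [if_neg h] at hy
      rcases ih (acc.1 ++ [n], true) y hy with h1 | h2
      · rcases List.mem_append.1 h1 with h1a | h1b
        · exact Or.inl h1a
        · simp only [List.mem_singleton] at h1b
          exact Or.inr (h1b ▸ List.mem_cons_self)
      · exact Or.inr (List.mem_cons_of_mem _ h2)

lemma bInner_flag (acc : List String × Bool) (ns : List String)
    (h : (bInner acc ns).2 = true) :
    acc.2 = true ∨ ∃ x, x ∈ (bInner acc ns).1 ∧ x ∉ acc.1 := by
  induction ns generalizing acc with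
  | nil => exact Or.inl (by simpa [bInner] using h)
  | cons n ns ih =>
    rw [bInner] at h ⊢
    by_cases hc : acc.1.contains n
    · rw [if_pos hc] at h ⊢
      exact ih acc h
    · rw [if_neg hc] at h ⊢
      right
      refine ⟨n, ?_, by simpa [List.contains_eq_mem] using hc⟩
      exact bInner_mono (acc.1 ++ [n], true) ns n (List.mem_append.2 (Or.inr (by simp)))

lemma bSweep_mono (d : PySem.Dict String (List String)) (l : List String)
    (acc : List String × Bool) : ∀ y ∈ acc.1, y ∈ (bSweep d acc l).1 := by
  induction l generalizing acc with
  | nil => intro y hy; simpa [bSweep] using hy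
  | cons n l ih =>
    intro y hy
    rw [bSweep]
    exact ih _ y (bInner_mono acc (pvNbrs d n) y hy)

lemma bSweep_subset (d : PySem.Dict String (List String)) (l : List String)
    (acc : List String × Bool) :
    ∀ y ∈ (bSweep d acc l).1, y ∈ acc.1 ∨ ∃ n, n ∈ l ∧ y ∈ pvNbrs d n := by
  induction l generalizing acc with
  | nil => intro y hy; exact Or.inl (by simpa [bSweep] using hy)
  | cons n l ih =>
    intro y hy
    rw [bSweep] at hy
    rcases ih _ y hy with h1 | ⟨m, hm, hy'⟩
    · rcases bInner_subset acc (pvNbrs d n) y h1 with h2 | h3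
      · exact Or.inl h2
      · exact Or.inr ⟨n, List.mem_cons_self, h3⟩
    · exact Or.inr ⟨m, List.mem_cons_of_mem _ hm, hy'⟩

lemma bSweep_flag (d : PySem.Dict String (List String)) (l : List String)
    (acc : List String × Bool) (h : (bSweep d acc l).2 = true) :
    acc.2 = true ∨ ∃ x, x ∈ (bSweep d acc l).1 ∧ x ∉ acc.1 := by
  induction l generalizing acc with
  | nil => exact Or.inl (by simpa [bSweep] using h)
  | cons n l ih =>
    rw [bSweep] at h ⊢
    rcases ih _ h with h1 | ⟨x, hx1, hx2⟩
    · rcases bInner_flag acc (pvNbrs d n) h1 with ha | ⟨x, hx1, hx2⟩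
      · exact Or.inl ha
      · exact Or.inr ⟨x, bSweep_mono d l _ x hx1, hx2⟩
    · exact Or.inr ⟨x, hx1, fun hc => hx2 (bInner_mono acc (pvNbrs d n) x hc)⟩

-- the while-changed loop
def bLoop (d : PySem.Dict String (List String)) (reach : List String) : List String :=
  let rc := bSweep d (reach, false) reach
  if h : rc.2 = true then bLoop d rc.1 else reach
termination_by pvCnt d reach
decreasing_by
  obtain h' | ⟨x, hx1, hx2⟩ := bSweep_flag d reach (reach, false) h
  · exact absurd h' (by simp)
  · have hxU : x ∈ pvU d := by
      rcases bSweep_subset d reach (reach, false) x hx1 with h1 | ⟨n, _, hn⟩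
      · exact absurd h1 hx2
      · exact pvNbrs_mem_U hn
    exact pvCountP_lt (pvU d) reach (bSweep d (reach, false) reach).1
      (bSweep_mono d reach (reach, false)) x hxU hx1 hx2

def has_directed_path_py_alt (adjacency : List (String × List String)) (start : String) (target : String) : Bool :=
  if start = target then true
  else if !((PySem.Dict.ofList adjacency).contains start) then false
  else (bLoop (PySem.Dict.ofList adjacency) [start]).contains target

-- ===== PRECONDITION & SPEC =====
def Spec_has_directed_path_py (adjacency : List (String × List String)) (start : String) (target : String) (out : Bool) : Prop := out = has_directed_path_py_alt adjacency start target
instance (adjacency : List (String × List String)) (start : String) (target : String) (out : Bool) : Decidable (Spec_has_directed_path_py adjacency start target out) := by unfold Spec_has_directed_path_py; infer_instance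

-- ===== CLAIM (what is proved, stated in full; the proofs are below) =====
def Claim_equal_has_directed_path_py : Prop := ∀ (adjacency : List (String × List String)) (start : String) (target : String), Dom_has_directed_path_py adjacency start target → Spec_has_directed_path_py adjacency start target (has_directed_path_py adjacency start target)

-- ===== LEMMAS AND PROOFS =====

lemma bInner_flag_true (acc : List String × Bool) (ns : List String) (h : acc.2 = true) :
    (bInner acc ns).2 = true := by
  induction ns generalizing acc with
  | nil => simpa [bInner] using h
  | cons n ns ih =>
    rw [bInner]
    by_cases hc : acc.1.contains n
    · rw [if_pos hc]; exact ih acc h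
    · rw [if_neg hc]; exact ih (acc.1 ++ [n], true) rfl

lemma bInner_false (acc : List String × Bool) (ns : List String)
    (h : (bInner acc ns).2 = false) :
    acc.2 = false ∧ (bInner acc ns).1 = acc.1 ∧ ∀ x ∈ ns, x ∈ acc.1 := by
  induction ns generalizing acc with
  | nil => exact ⟨by simpa [bInner] using h, by simp [bInner], by simp⟩
  | cons n ns ih =>
    rw [bInner] at h ⊢
    by_cases hc : acc.1.contains n
    · rw [if_pos hc] at h ⊢
      obtain ⟨h1, h2, h3⟩ := ih acc h
      refine ⟨h1, h2, ?_⟩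
      intro x hx
      rcases List.mem_cons.1 hx with rfl | hx'
      · simpa [List.contains_eq_mem] using hc
      · exact h3 x hx'
    · rw [if_neg hc] at h
      have := bInner_flag_true (acc.1 ++ [n], true) ns rfl
      rw [this] at h
      exact absurd h (by simp)

lemma bSweep_false (d : PySem.Dict String (List String)) (l : List String)
    (acc : List String × Bool) (h : (bSweep d acc l).2 = false) :
    (bSweep d acc l).1 = acc.1 ∧ acc.2 = false ∧ ∀ n ∈ l, ∀ x ∈ pvNbrs d n, x ∈ acc.1 := by
  induction l generalizing acc with
  | nil => exact ⟨by simp [bSweep], by simpa [bSweep] using h, by simp⟩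
  | cons n l ih =>
    rw [bSweep] at h ⊢
    obtain ⟨heq, hflag, hall⟩ := ih _ h
    obtain ⟨ha2, hinner_eq, hinner_all⟩ := bInner_false acc (pvNbrs d n) hflag
    rw [hinner_eq] at heq hall
    refine ⟨heq, ha2, ?_⟩
    intro m hm x hx
    rcases List.mem_cons.1 hm with rfl | hm'
    · exact hinner_all x hx
    · exact hall m hm' x hx


lemma bLoop_mono (d : PySem.Dict String (List String)) (reach : List String) :
    ∀ y ∈ reach, y ∈ bLoop d reach := by
  induction reach using bLoop.induct d with
  | case1 reach rc h ih =>
    intro y hy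
    rw [bLoop]
    rw [dif_pos h]
    exact ih y (bSweep_mono d reach (reach, false) y hy)
  | case2 reach rc h =>
    intro y hy
    rw [bLoop]
    rw [dif_neg h]
    exact hy

lemma bLoop_closed (d : PySem.Dict String (List String)) (reach : List String) :
    ∀ x ∈ bLoop d reach, ∀ y ∈ pvNbrs d x, y ∈ bLoop d reach := by
  induction reach using bLoop.induct d with
  | case1 reach rc h ih =>
    rw [bLoop]
    rw [dif_pos h]
    exact ih
  | case2 reach rc h =>
    rw [bLoop]
    rw [dif_neg h]
    intro x hx y hy
    have hfalse : (bSweep d (reach, false) reach).2 = false := by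
      cases hb : (bSweep d (reach, false) reach).2
      · rfl
      · exact absurd hb h
    exact bSweep_false d reach (reach, false) hfalse |>.2.2 x hx y hy

lemma bLoop_min (d : PySem.Dict String (List String)) (reach : List String) (T : List String)
    (hsub : ∀ y ∈ reach, y ∈ T) (hcl : ∀ x ∈ T, ∀ y ∈ pvNbrs d x, y ∈ T) :
    ∀ y ∈ bLoop d reach, y ∈ T := by
  induction reach using bLoop.induct d with
  | case1 reach rc h ih =>
    rw [bLoop]
    rw [dif_pos h]
    apply ih
    intro y hy
    rcases bSweep_subset d reach (reach, false) y hy with h1 | ⟨n, hn, hy'⟩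
    · exact hsub y h1
    · exact hcl n (hsub n hn) y hy'
  | case2 reach rc h =>
    rw [bLoop]
    rw [dif_neg h]
    exact hsub

lemma aRun_true (d : PySem.Dict String (List String)) (target : String)
    (seen stack pending : List String) (C : List String)
    (hcl : ∀ x ∈ C, ∀ y ∈ pvNbrs d x, y ∈ C)
    (hseen : ∀ x ∈ seen, x ∈ C) (hstack : ∀ x ∈ stack, x ∈ seen)
    (hpend : ∀ x ∈ pending, x ∈ C)
    (h : aRun d target seen stack pending = true) : target ∈ C := by
  induction seen, stack, pending using aRun.induct d target with
  | case1 seen stack ps =>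
    exact hpend target List.mem_cons_self
  | case2 seen stack n ps hne hc ih =>
    rw [aRun, if_neg hne, if_pos hc] at h
    exact ih hseen hstack (fun x hx => hpend x (List.mem_cons_of_mem _ hx)) h
  | case3 seen stack n ps hne hc ih =>
    rw [aRun, if_neg hne, if_neg hc] at h
    refine ih ?_ ?_ (fun x hx => hpend x (List.mem_cons_of_mem _ hx)) h
    · intro x hx
      rcases List.mem_cons.1 hx with rfl | hx'
      · exact hpend x List.mem_cons_self
      · exact hseen x hx'
    · intro x hx
      rcases List.mem_cons.1 hx with rfl | hx'
      · exact List.mem_cons_self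
      · exact List.mem_cons_of_mem _ (hstack x hx')
  | case4 seen =>
    rw [aRun] at h
    exact absurd h (by simp)
  | case5 seen node rest ih =>
    rw [aRun] at h
    refine ih hseen (fun x hx => hstack x (List.mem_cons_of_mem _ hx)) ?_ h
    intro x hx
    exact hcl node (hseen node (hstack node List.mem_cons_self)) x hx

lemma aRun_false (d : PySem.Dict String (List String)) (target : String)
    (seen stack pending : List String)
    (hts : target ∉ seen)
    (hinv : ∀ x ∈ seen, x ∈ stack ∨ (∀ y ∈ pvNbrs d x, y ∈ seen ∨ y ∈ pending))
    (h : aRun d target seen stack pending = false) :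
    ∃ S : List String, (∀ x ∈ seen, x ∈ S) ∧ target ∉ S ∧ (∀ x ∈ S, ∀ y ∈ pvNbrs d x, y ∈ S) := by
  induction seen, stack, pending using aRun.induct d target with
  | case1 seen stack ps =>
    rw [aRun, if_pos rfl] at h
    exact absurd h (by simp)
  | case2 seen stack n ps hne hc ih =>
    rw [aRun, if_neg hne, if_pos hc] at h
    refine ih hts ?_ h
    intro x hx
    rcases hinv x hx with h1 | h2
    · exact Or.inl h1
    · right
      intro y hy
      rcases h2 y hy with hy1 | hy2
      · exact Or.inl hy1
      · rcases List.mem_cons.1 hy2 with rfl | hy3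
        · exact Or.inl (by simpa [List.contains_eq_mem] using hc)
        · exact Or.inr hy3
  | case3 seen stack n ps hne hc ih =>
    rw [aRun, if_neg hne, if_neg hc] at h
    have hstep : ∃ S : List String, (∀ x ∈ n :: seen, x ∈ S) ∧ target ∉ S ∧
        (∀ x ∈ S, ∀ y ∈ pvNbrs d x, y ∈ S) := by
      refine ih ?_ ?_ h
      · intro hmem
        rcases List.mem_cons.1 hmem with rfl | hmem'
        · exact hne rfl
        · exact hts hmem'
      · intro x hx
        rcases List.mem_cons.1 hx with rfl | hx'
        · exact Or.inl List.mem_cons_self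
        · rcases hinv x hx' with h1 | h2
          · exact Or.inl (List.mem_cons_of_mem _ h1)
          · right
            intro y hy
            rcases h2 y hy with hy1 | hy2
            · exact Or.inl (List.mem_cons_of_mem _ hy1)
            · rcases List.mem_cons.1 hy2 with rfl | hy3
              · exact Or.inl List.mem_cons_self
              · exact Or.inr hy3
    obtain ⟨S, hS1, hS2, hS3⟩ := hstep
    exact ⟨S, fun x hx => hS1 x (List.mem_cons_of_mem _ hx), hS2, hS3⟩
  | case4 seen =>
    refine ⟨seen, fun x hx => hx, hts, ?_⟩
    intro x hx y hy
    rcases hinv x hx with h1 | h2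
    · exact absurd h1 (List.not_mem_nil)
    · rcases h2 y hy with hy1 | hy2
      · exact hy1
      · exact absurd hy2 (List.not_mem_nil)
  | case5 seen node rest ih =>
    rw [aRun] at h
    refine ih hts ?_ h
    intro x hx
    rcases hinv x hx with h1 | h2
    · rcases List.mem_cons.1 h1 with rfl | h1'
      · exact Or.inr (fun y hy => Or.inr hy)
      · exact Or.inl h1'
    · right
      intro y hy
      rcases h2 y hy with hy1 | hy2
      · exact Or.inl hy1
      · exact absurd hy2 (List.not_mem_nil)

-- ===== VERDICT (by name: the statement is the Claim_ definition above) =====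
theorem has_directed_path_py_spec : Claim_equal_has_directed_path_py := by
  intro adjacency start target _hdom
  unfold Spec_has_directed_path_py has_directed_path_py has_directed_path_py_alt
  by_cases hst : start = target
  · simp [hst]
  · rw [if_neg hst, if_neg hst]
    by_cases hc : (PySem.Dict.ofList adjacency).contains start
    · rw [if_neg (by simp [hc]), if_neg (by simp [hc])]
      set d := PySem.Dict.ofList adjacency with hd
      set C := bLoop d [start] with hC
      cases hct : C.contains target
      · -- target not reachable: A must return false
        have htC : target ∉ C := by simpa [List.contains_eq_mem] using hct
        cases ha : aRun d target [start] [start] []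
        · simp [hct]
        · exfalso
          apply htC
          exact aRun_true d target [start] [start] [] C (bLoop_closed d [start])
            (fun x hx => by simp at hx; exact hx ▸ bLoop_mono d [start] start (by simp))
            (fun x hx => hx) (by simp) ha
      · -- target reachable: A must return true
        have htC : target ∈ C := by simpa [List.contains_eq_mem] using hct
        cases ha : aRun d target [start] [start] []
        · exfalso
          obtain ⟨S, hS1, hS2, hS3⟩ := aRun_false d target [start] [start] []
            (by simp; exact fun h => hst h.symm) (fun x hx => Or.inl (by simpa using hx)) ha
          exact hS2 (bLoop_min d [start] S hS1 hS3 target htC)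
        · simp [hct]
    · rw [if_pos (by simp [hc]), if_pos (by simp [hc])]
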